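-- pv_equiv track=rewrite | github.com/st-pauls-school/bio | 2012/q3/python/number-ladder.py | convert
-- ===== SOURCE A (Python) =====
-- def convert(i):
-- 	conversion = ['ZERO', 'ONE', 'TWO','THREE','FOUR','FIVE','SIX','SEVEN','EIGHT','NINE']
-- 	s = ''
-- 	if i == 0:
-- 		s = conversion[0]
-- 	while i > 0:
-- 		s += conversion[i%10]
-- 		i //= 10
-- 	return  ''.join(sorted(list(s)))
-- ===== SOURCE B (Python) =====
-- def convert(i):
--     conversion = ['ZERO', 'ONE', 'TWO', 'THREE', 'FOUR', 'FIVE', 'SIX', 'SEVEN', 'EIGHT', 'NINE']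
--     counts = [0] * 26
--     def tally(word):
--         for c in word:
--             counts[ord(c) - 65] += 1
--     if i == 0:
--         tally(conversion[0])
--     while i > 0:
--         tally(conversion[i % 10])
--         i //= 10
--     return ''.join(chr(65 + k) * counts[k] for k in range(26))
-- ===== Notes on version B (the rewrite author's own statement) =====
-- stated objective: alternative
-- what changed: Replaces building a concatenated string and comparison-sorting it with a per-letter frequency table incremented inside the digit loop, then a counting-sort reconstruction over the alphabet A-Z.
import Mathlib
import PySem

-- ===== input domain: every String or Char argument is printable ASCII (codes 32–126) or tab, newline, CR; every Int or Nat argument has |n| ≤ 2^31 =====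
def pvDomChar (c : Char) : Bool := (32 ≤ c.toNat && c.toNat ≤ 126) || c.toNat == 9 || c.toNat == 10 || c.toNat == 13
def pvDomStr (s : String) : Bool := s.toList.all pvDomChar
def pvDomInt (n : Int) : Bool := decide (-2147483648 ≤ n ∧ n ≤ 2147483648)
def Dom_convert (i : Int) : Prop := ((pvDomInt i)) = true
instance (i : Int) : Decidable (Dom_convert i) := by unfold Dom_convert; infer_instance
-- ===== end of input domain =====

-- B replaces A's concatenate-then-comparison-sort by a per-letter frequency table filled inside the
-- digit loop and a counting-sort reconstruction over the alphabet (objective: alternative).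

-- ===== PORT A =====
-- conversion = ['ZERO', …, 'NINE']
-- strings are modelled as List Char throughout (Lean's own String is kernel-opaque)
def convWords : List (List Char) :=
  [['Z','E','R','O'], ['O','N','E'], ['T','W','O'], ['T','H','R','E','E'],
   ['F','O','U','R'], ['F','I','V','E'], ['S','I','X'], ['S','E','V','E','N'],
   ['E','I','G','H','T'], ['N','I','N','E']]

-- termination measure for the shared `while i > 0: … i //= 10` loop shape
theorem convDecr (i : Int) (h : 0 < i) : (PySem.Int.floordiv i 10).toNat < i.toNat := by
  have h1 : PySem.Int.floordiv i 10 < i :=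
    (PySem.Int.floordiv_lt_iff_lt_mul (by norm_num)).mpr (by omega)
  have h2 : 0 ≤ PySem.Int.floordiv i 10 :=
    (PySem.Int.le_floordiv_iff_mul_le (by norm_num)).mpr (by omega)
  omega

-- while i > 0: s += conversion[i % 10]; i //= 10   (s modelled as List Char)
def convLoopA (i : Int) (s : List Char) : List Char :=
  if h : 0 < i then
    convLoopA (PySem.Int.floordiv i 10)
      (s ++ PySem.List.pyGetD convWords (PySem.Int.mod i 10) [])
  else s
termination_by i.toNat
decreasing_by exact convDecr i h

def convert (i : Int) : String :=
  let s : List Char := if i = 0 then PySem.List.pyGetD convWords 0 [] else []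
  String.mk (PySem.List.sorted (convLoopA i s) (fun c => c) false)

-- ===== PORT B =====
-- counts[ord(c) - 65] += 1
def tallyStep (cs : List Nat) (c : Char) : List Nat :=
  cs.set (c.toNat - 65) (cs.getD (c.toNat - 65) 0 + 1)

-- tally(word): for c in word: counts[ord(c) - 65] += 1
def tallyWord (cs : List Nat) (w : List Char) : List Nat := w.foldl tallyStep cs

-- while i > 0: tally(conversion[i % 10]); i //= 10
def convLoopB (i : Int) (cs : List Nat) : List Nat :=
  if h : 0 < i then
    convLoopB (PySem.Int.floordiv i 10)
      (tallyWord cs (PySem.List.pyGetD convWords (PySem.Int.mod i 10) []))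
  else cs
termination_by i.toNat
decreasing_by exact convDecr i h

-- ''.join(chr(65 + k) * counts[k] for k in range(26))  (chr(65+k) ported by hand as
-- Char.ofNat (65+k); exact since 65+k < 0xD800 is a valid code point)
def convert_alt (i : Int) : String :=
  let cs0 : List Nat := List.replicate 26 0
  let cs1 : List Nat :=
    if i = 0 then tallyWord cs0 (PySem.List.pyGetD convWords 0 []) else cs0
  let cs : List Nat := convLoopB i cs1
  String.mk ((List.range 26).flatMap
    (fun k => List.replicate (cs.getD k 0) (Char.ofNat (65 + k))))

-- ===== PRECONDITION & SPEC =====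
def Spec_convert (i : Int) (out : String) : Prop := out = convert_alt i
instance (i : Int) (out : String) : Decidable (Spec_convert i out) := by unfold Spec_convert; infer_instance

-- ===== CLAIM (what is proved, stated in full; the proofs are below) =====
def Claim_equal_convert : Prop := ∀ (i : Int), Dom_convert i → Spec_convert i (convert i)

-- ===== LEMMAS AND PROOFS =====

-- every char of every digit word is an uppercase letter
theorem wordsOK : ∀ w ∈ convWords, ∀ c ∈ w, 65 ≤ c.toNat ∧ c.toNat ≤ 90 := by
  intro w hw
  fin_cases hw <;> (intro c hc; fin_cases hc <;> decide)

-- every char of every digit word is an uppercase letter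
theorem wordOK (d : Int) (h0 : 0 ≤ d) (h1 : d < 10) :
    ∀ c ∈ PySem.List.pyGetD convWords d [], 65 ≤ c.toNat ∧ c.toNat ≤ 90 := by
  rw [PySem.List.pyGetD_eq_getElem convWords [] h0 (by simp [convWords]; omega)]
  exact wordsOK _ (List.getElem_mem _)

-- A's loop only prepends its accumulator
theorem loopA_prefix : ∀ (n : Nat) (i : Int), i.toNat ≤ n →
    ∀ s, convLoopA i s = s ++ convLoopA i [] := by
  intro n
  induction n with
  | zero =>
      intro i hi s
      have h : ¬ 0 < i := by omega
      conv_lhs => rw [convLoopA]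
      conv_rhs => rw [convLoopA]
      simp [h]
  | succ n ih =>
      intro i hi s
      by_cases h : 0 < i
      · have hd := convDecr i h
        conv_lhs => rw [convLoopA]
        conv_rhs => rw [convLoopA]
        simp only [h, dif_pos]
        rw [ih _ (by omega) (s ++ _), ih _ (by omega) ([] ++ _)]
        simp
      · conv_lhs => rw [convLoopA]
        conv_rhs => rw [convLoopA]
        simp [h]

theorem loopA_OK : ∀ (n : Nat) (i : Int), i.toNat ≤ n →
    ∀ c ∈ convLoopA i [], 65 ≤ c.toNat ∧ c.toNat ≤ 90 := by
  intro n
  induction n with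
  | zero =>
      intro i hi
      have h : ¬ 0 < i := by omega
      rw [convLoopA]; simp [h]
  | succ n ih =>
      intro i hi c hc
      by_cases h : 0 < i
      · have hd := convDecr i h
        rw [convLoopA] at hc
        simp only [h, dif_pos] at hc
        rw [loopA_prefix n _ (by omega)] at hc
        rcases List.mem_append.mp hc with hc | hc
        · exact wordOK _ (PySem.Int.mod_nonneg i (by norm_num))
            (PySem.Int.mod_lt i (by norm_num)) c (by simpa using hc)
        · exact ih _ (by omega) c hc
      · rw [convLoopA] at hc; simp [h] at hc

-- B's loop is the tally of the chars A's loop accumulates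
theorem loopB_eq_tally : ∀ (n : Nat) (i : Int), i.toNat ≤ n →
    ∀ cs, convLoopB i cs = tallyWord cs (convLoopA i []) := by
  intro n
  induction n with
  | zero =>
      intro i hi cs
      have h : ¬ 0 < i := by omega
      conv_lhs => rw [convLoopB]
      conv_rhs => rw [convLoopA]
      simp [h, tallyWord]
  | succ n ih =>
      intro i hi cs
      by_cases h : 0 < i
      · have hd := convDecr i h
        conv_lhs => rw [convLoopB]
        conv_rhs => rw [convLoopA]
        simp only [h, dif_pos]
        rw [ih _ (by omega),
          loopA_prefix n (PySem.Int.floordiv i 10) (by omega)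
            ([] ++ PySem.List.pyGetD convWords (PySem.Int.mod i 10) [])]
        simp [tallyWord, List.foldl_append]
      · conv_lhs => rw [convLoopB]
        conv_rhs => rw [convLoopA]
        simp [h, tallyWord]

theorem getD_tallyStep (cs : List Nat) (c : Char) (k : Nat)
    (hc : c.toNat - 65 < cs.length) :
    (tallyStep cs c).getD k 0 = cs.getD k 0 + (if c.toNat - 65 = k then 1 else 0) := by
  unfold tallyStep
  by_cases h : c.toNat - 65 = k
  · subst h
    simp [List.getD_eq_getElem?_getD, List.getElem?_set, hc]
  · simp [List.getD_eq_getElem?_getD, List.getElem?_set, h]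

theorem getD_tallyWord : ∀ (w : List Char) (cs : List Nat) (k : Nat),
    (∀ c ∈ w, c.toNat - 65 < cs.length) →
    (tallyWord cs w).getD k 0 = cs.getD k 0 + w.countP (fun c => c.toNat - 65 == k) := by
  intro w
  induction w with
  | nil => intro cs k _; simp [tallyWord]
  | cons c t ih =>
      intro cs k hw
      show (tallyWord (tallyStep cs c) t).getD k 0 = _
      rw [ih _ k (by intro x hx; simpa [tallyStep, List.length_set] using hw x (List.mem_cons_of_mem _ hx)),
        getD_tallyStep cs c k (hw c List.mem_cons_self)]
      rw [List.countP_cons]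
      simp only [beq_iff_eq]
      omega

theorem toNat_chr (k : Nat) (h : k < 1000) : (Char.ofNat (65 + k)).toNat = 65 + k := by
  rw [Char.toNat_ofNat, if_pos]
  exact Or.inl (by omega)

theorem chr_le_chr (j k : Nat) (hj : j < 1000) (hk : k < 1000) (h : j ≤ k) :
    Char.ofNat (65 + j) ≤ Char.ofNat (65 + k) := by
  have h1 := toNat_chr j hj
  have h2 := toNat_chr k hk
  simp only [Char.le_def]
  apply UInt32.le_iff_toNat_le.mpr
  simp only [Char.toNat] at h1 h2
  omega

theorem countP_eq_count (l : List Char) (hl : ∀ c ∈ l, 65 ≤ c.toNat ∧ c.toNat ≤ 90)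
    (k : Nat) (hk : k < 26) :
    l.countP (fun c => c.toNat - 65 == k) = l.count (Char.ofNat (65 + k)) := by
  rw [List.count, List.countP_congr]
  intro c hc
  obtain ⟨h1, h2⟩ := hl c hc
  simp only [beq_iff_eq]
  constructor
  · intro h
    have : c.toNat = 65 + k := by omega
    rw [← Char.ofNat_toNat c, this]
  · intro h
    rw [h, toNat_chr k (by omega)]
    omega

theorem countF (m : Nat → Nat) (a : Char) : ∀ (n : Nat), n ≤ 26 →
    ((List.range n).flatMap (fun k => List.replicate (m k) (Char.ofNat (65 + k)))).count a
      = if 65 ≤ a.toNat ∧ a.toNat < 65 + n then m (a.toNat - 65) else 0 := by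
  intro n
  induction n with
  | zero => simp
  | succ n ih =>
      intro h
      rw [List.range_succ, List.flatMap_append, List.count_append, ih (by omega)]
      simp only [List.flatMap_cons, List.flatMap_nil, List.append_nil, List.count_replicate]
      by_cases ha : a.toNat = 65 + n
      · have h1 : Char.ofNat (65 + n) = a := by
          rw [← Char.ofNat_toNat a, ha]
        have h2 : ¬ (65 ≤ a.toNat ∧ a.toNat < 65 + n) := by omega
        rw [if_neg h2, if_pos (by simp [h1]), if_pos (by omega), ha]
        simp
      · have h1 : ¬ (Char.ofNat (65 + n) == a) = true := by
          simp only [beq_iff_eq]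
          intro he
          apply ha
          rw [← he, toNat_chr n (by omega)]
        rw [if_neg h1]
        split_ifs with h2 h3 <;> first | rfl | omega

theorem pairF (m : Nat → Nat) : ∀ (n : Nat), n ≤ 26 →
    ((List.range n).flatMap (fun k => List.replicate (m k) (Char.ofNat (65 + k)))).Pairwise (· ≤ ·) := by
  intro n
  induction n with
  | zero => simp
  | succ n ih =>
      intro h
      rw [List.range_succ, List.flatMap_append]
      rw [List.pairwise_append]
      refine ⟨ih (by omega), ?_, ?_⟩
      · simp only [List.flatMap_cons, List.flatMap_nil, List.append_nil]
        exact List.pairwise_replicate.mpr (Or.inr le_rfl)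
      · intro x hx y hy
        simp only [List.flatMap_cons, List.flatMap_nil, List.append_nil] at hy
        obtain ⟨k, hk, hxk⟩ := List.mem_flatMap.mp hx
        have hkn : k < n := List.mem_range.mp hk
        rw [List.eq_of_mem_replicate hxk, List.eq_of_mem_replicate hy]
        exact chr_le_chr k n (by omega) (by omega) (by omega)

-- counting-sort reconstruction of an uppercase-letter list IS its sort
theorem countingSort_eq_sorted (l : List Char)
    (hl : ∀ c ∈ l, 65 ≤ c.toNat ∧ c.toNat ≤ 90) :
    PySem.List.sorted l (fun c => c) false
      = (List.range 26).flatMap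
          (fun k => List.replicate ((tallyWord (List.replicate 26 0) l).getD k 0)
            (Char.ofNat (65 + k))) := by
  have hlen : ∀ c ∈ l, c.toNat - 65 < (List.replicate 26 (0:Nat)).length := by
    intro c hc
    have := hl c hc
    simp [List.length_replicate]
    omega
  have hcs : ∀ k < 26, (tallyWord (List.replicate 26 0) l).getD k 0
      = l.count (Char.ofNat (65 + k)) := by
    intro k hk
    rw [getD_tallyWord l _ k hlen, countP_eq_count l hl k hk,
      List.getD_eq_getElem?_getD, List.getElem?_replicate]
    split_ifs <;> simp
  apply PySem.List.sorted_id_eq_of_perm_of_pairwise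
  · apply List.perm_iff_count.mpr
    intro a
    rw [countF _ a 26 le_rfl]
    by_cases ha : 65 ≤ a.toNat ∧ a.toNat < 91
    · rw [if_pos ha, hcs _ (by omega)]
      congr 1
      rw [show 65 + (a.toNat - 65) = a.toNat by omega, Char.ofNat_toNat]
    · rw [if_neg ha]
      symm
      rw [List.count_eq_zero]
      intro hmem
      exact ha (by have := hl a hmem; omega)
  · exact pairF _ 26 le_rfl

-- ===== VERDICT (by name: the statement is the Claim_ definition above) =====
theorem convert_spec : Claim_equal_convert := by
  intro i _
  unfold Spec_convert convert convert_alt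
  set s0 : List Char :=
    if i = 0 then PySem.List.pyGetD convWords 0 [] else [] with hs0
  have hs0OK : ∀ c ∈ s0, 65 ≤ c.toNat ∧ c.toNat ≤ 90 := by
    rw [hs0]
    split_ifs
    · exact wordOK 0 (by norm_num) (by norm_num)
    · simp
  have hl : convLoopA i s0 = s0 ++ convLoopA i [] := loopA_prefix i.toNat i le_rfl s0
  have hOK : ∀ c ∈ convLoopA i s0, 65 ≤ c.toNat ∧ c.toNat ≤ 90 := by
    rw [hl]
    intro c hc
    rcases List.mem_append.mp hc with hc | hc
    · exact hs0OK c hc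
    · exact loopA_OK i.toNat i le_rfl c hc
  have hcs1 : (if i = 0 then tallyWord (List.replicate 26 0) (PySem.List.pyGetD convWords 0 [])
      else List.replicate 26 0) = tallyWord (List.replicate 26 0) s0 := by
    rw [hs0]
    split_ifs <;> simp [tallyWord]
  have hB : convLoopB i (tallyWord (List.replicate 26 0) s0)
      = tallyWord (List.replicate 26 0) (convLoopA i s0) := by
    rw [loopB_eq_tally i.toNat i le_rfl, hl]
    simp [tallyWord, List.foldl_append]
  simp only [hcs1, hB]
  exact congrArg String.mk (countingSort_eq_sorted (convLoopA i s0) hOK)
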